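-- pv_equiv track=rewrite | github.com/jason-allen-oneal/tiktok-toolkit | scripts/check_pii_handling.py | _is_in_comment_or_string
-- ===== SOURCE A (Python) =====
-- def _is_in_comment_or_string(line: str, pos: int) -> bool:
--     """Check if position is in a comment or string literal"""
--     # Simple check for comments
--     comment_pos = line.find('#')
--     if comment_pos != -1 and pos > comment_pos:
--         return True
--
--     # Check for string literals (simplified)
--     quote_chars = ['"', "'"]
--     for quote in quote_chars:
--         quote_pos = line.find(quote)
--         if quote_pos != -1 and pos > quote_pos:
--             return True
--
--     return False
-- ===== SOURCE B (Python) =====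
-- def _is_in_comment_or_string(line: str, pos: int) -> bool:
--     """Return True iff pos lies strictly after the earliest '#', '"' or "'" in line."""
--     for i, ch in enumerate(line):
--         if ch in '#"\'':
--             return pos > i
--     return False
-- ===== Notes on version B (the rewrite author's own statement) =====
-- stated objective: simpler
-- what changed: B replaces A's three sequential line.find calls (comment char, then each quote char) by one left-to-right scan that stops at the earliest special character and compares pos against that single index.
import Mathlib
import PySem

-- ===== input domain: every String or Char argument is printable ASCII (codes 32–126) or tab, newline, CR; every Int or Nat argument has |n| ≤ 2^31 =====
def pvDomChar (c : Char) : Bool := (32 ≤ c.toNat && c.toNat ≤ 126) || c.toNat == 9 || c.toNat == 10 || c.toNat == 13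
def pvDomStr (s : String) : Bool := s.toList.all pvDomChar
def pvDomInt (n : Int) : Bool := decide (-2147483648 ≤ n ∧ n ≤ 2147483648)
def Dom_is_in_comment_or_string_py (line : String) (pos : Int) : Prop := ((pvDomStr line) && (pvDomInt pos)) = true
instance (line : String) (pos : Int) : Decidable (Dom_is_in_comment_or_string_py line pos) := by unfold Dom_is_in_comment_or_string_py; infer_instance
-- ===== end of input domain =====

-- B: one left-to-right scan stopping at the earliest '#'/'"'/'\'' instead of A's three sequential find calls (simpler decomposition).
-- ===== PORT A =====
-- for quote in quote_chars: if line.find(quote) != -1 and pos > line.find(quote): return True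
def pyQuoteLoop (line : String) (pos : Int) : List String → Bool
  | [] => false
  | q :: rest =>
      let quotePos := PySem.Str.find line q
      if quotePos ≠ -1 ∧ pos > quotePos then true else pyQuoteLoop line pos rest

def is_in_comment_or_string_py (line : String) (pos : Int) : Bool :=
  let commentPos := PySem.Str.find line "#"
  if commentPos ≠ -1 ∧ pos > commentPos then true
  else pyQuoteLoop line pos ["\"", "'"]

-- ===== PORT B =====
-- for i, ch in enumerate(line): if ch in '#"\'': return pos > i
def altScan (pos : Int) : Nat → List Char → Bool
  | _, [] => false
  | i, ch :: rest =>
      if ch = '#' ∨ ch = '"' ∨ ch = '\'' then decide (pos > (i : Int))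
      else altScan pos (i + 1) rest

def is_in_comment_or_string_py_alt (line : String) (pos : Int) : Bool :=
  altScan pos 0 line.toList

-- ===== PRECONDITION & SPEC =====
def Spec_is_in_comment_or_string_py (line : String) (pos : Int) (out : Bool) : Prop := out = is_in_comment_or_string_py_alt line pos
instance (line : String) (pos : Int) (out : Bool) : Decidable (Spec_is_in_comment_or_string_py line pos out) := by unfold Spec_is_in_comment_or_string_py; infer_instance

-- ===== CLAIM (what is proved, stated in full; the proofs are below) =====
def Claim_equal_is_in_comment_or_string_py : Prop := ∀ (line : String) (pos : Int), Dom_is_in_comment_or_string_py line pos → Spec_is_in_comment_or_string_py line pos (is_in_comment_or_string_py line pos)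

-- ===== LEMMAS AND PROOFS =====

def pvSpecChar (c : Char) : Bool := decide (c = '#' ∨ c = '"' ∨ c = '\'')

lemma pv_singleton_prefix_iff (c : Char) (xs : List Char) : [c] <+: xs ↔ xs.head? = some c := by
  cases xs <;> simp [List.cons_prefix_cons, eq_comm]

lemma pv_find_single_neg {c : Char} {l : List Char} (h : c ∉ l) :
    PySem.Chars.find l [c] = -1 :=
  (PySem.Chars.find_eq_neg_one_iff l [c]).2 (by simpa [List.singleton_infix_iff] using h)

lemma pv_find_single_spec {c : Char} {l : List Char} (h : 0 ≤ PySem.Chars.find l [c]) :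
    l[(PySem.Chars.find l [c]).toNat]? = some c ∧
      ∀ i < (PySem.Chars.find l [c]).toNat, l[i]? ≠ some c := by
  obtain ⟨h1, h2⟩ := PySem.Chars.find_spec h
  refine ⟨?_, fun i hi => ?_⟩
  · rw [← List.head?_drop]; exact (pv_singleton_prefix_iff _ _).1 h1
  · intro hc
    exact h2 i hi ((pv_singleton_prefix_iff _ _).2 (by rw [List.head?_drop]; exact hc))

lemma pv_A_iff (line : String) (pos : Int) :
    is_in_comment_or_string_py line pos = true ↔
      ((PySem.Chars.find line.toList ['#'] ≠ -1 ∧ pos > PySem.Chars.find line.toList ['#']) ∨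
       (PySem.Chars.find line.toList ['"'] ≠ -1 ∧ pos > PySem.Chars.find line.toList ['"']) ∨
       (PySem.Chars.find line.toList ['\''] ≠ -1 ∧ pos > PySem.Chars.find line.toList ['\''])) := by
  have h1 : ("#" : String).toList = ['#'] := by decide
  have h2 : ("\"" : String).toList = ['"'] := by decide
  have h3 : ("'" : String).toList = ['\''] := by decide
  simp only [is_in_comment_or_string_py, pyQuoteLoop, PySem.Str.find_eq, h1, h2, h3]
  split_ifs with a b c
  · simpa using Or.inl a
  · simpa using Or.inr (Or.inl b)
  · simpa using Or.inr (Or.inr c)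
  · simp only [false_iff]
    rintro (h | h | h)
    exacts [a h, b h, c h]

lemma pv_altScan_eq (pos : Int) (l : List Char) (k : Nat) :
    altScan pos k l = (match List.findIdx? pvSpecChar l with
      | none => false
      | some j => decide (pos > ((k : Int) + j))) := by
  induction l generalizing k with
  | nil => simp [altScan]
  | cons ch rest ih =>
    rw [altScan, List.findIdx?_cons]
    by_cases h : ch = '#' ∨ ch = '"' ∨ ch = '\''
    · simp [h, pvSpecChar]
    · simp only [if_neg h, ih (k + 1), pvSpecChar, decide_eq_true_eq]
      cases List.findIdx? pvSpecChar rest <;> simp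
      · ring_nf

lemma pv_main (line : String) (pos : Int) :
    is_in_comment_or_string_py line pos = is_in_comment_or_string_py_alt line pos := by
  rw [is_in_comment_or_string_py_alt, pv_altScan_eq]
  set l := line.toList with hl
  cases hf : List.findIdx? pvSpecChar l with
  | none =>
    have hall : ∀ x ∈ l, pvSpecChar x = false := List.findIdx?_eq_none_iff.1 hf
    have hno : ∀ c : Char, (c = '#' ∨ c = '"' ∨ c = '\'') → PySem.Chars.find l [c] = -1 := by
      intro c hc
      refine pv_find_single_neg (fun hmem => ?_)
      have := hall c hmem
      simp [pvSpecChar, hc] at this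
    simp only [Bool.eq_false_iff, ne_eq]
    intro hA
    rcases (pv_A_iff line pos).1 hA with ⟨h, _⟩ | ⟨h, _⟩ | ⟨h, _⟩ <;>
      exact h (hno _ (by simp)) 
  | some j =>
    obtain ⟨hj, hpj, hmin⟩ := List.findIdx?_eq_some_iff_getElem.1 hf
    -- any special char present has find ≥ j
    have hge : ∀ c : Char, (c = '#' ∨ c = '"' ∨ c = '\'') →
        PySem.Chars.find l [c] ≠ -1 → (j : Int) ≤ PySem.Chars.find l [c] := by
      intro c hc hne
      have hpos : 0 ≤ PySem.Chars.find l [c] := by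
        rcases (PySem.Chars.neg_one_le_find l [c]).lt_or_eq with h | h
        · omega
        · exact absurd h.symm hne
      obtain ⟨hget, _⟩ := pv_find_single_spec hpos
      set m := (PySem.Chars.find l [c]).toNat with hm
      have hmlt : m < l.length := by
        by_contra h
        simp [List.getElem?_eq_none (le_of_not_gt h)] at hget
      by_contra hlt
      have hmj : m < j := by omega
      have := hmin m hmj
      rw [List.getElem?_eq_getElem hmlt] at hget
      have : pvSpecChar l[m] = true := by
        simp only [Option.some.injEq] at hget
        simp [pvSpecChar, hget, hc]
      exact (hmin m hmj) this
    by_cases hgt : pos > (0 : Int) + j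
    · -- show find l [l[j]] = j and conclude A = true
      set c := l[j] with hc
      have hcs : c = '#' ∨ c = '"' ∨ c = '\'' := by
        have := hpj; simp [pvSpecChar, hc] at this ⊢; tauto
      have hmem : c ∈ l := List.getElem_mem hj
      have hpos : 0 ≤ PySem.Chars.find l [c] := by
        rcases (PySem.Chars.neg_one_le_find l [c]).lt_or_eq with h | h
        · omega
        · exact absurd ((PySem.Chars.find_eq_neg_one_iff l [c]).1 h.symm)
            (by simpa [List.singleton_infix_iff] using hmem)
      obtain ⟨hget, hfirst⟩ := pv_find_single_spec hpos
      set m := (PySem.Chars.find l [c]).toNat with hm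
      have hmj : m = j := by
        rcases lt_trichotomy m j with h | h | h
        · exfalso
          have hmlt : m < l.length := by omega
          rw [List.getElem?_eq_getElem hmlt] at hget
          simp only [Option.some.injEq] at hget
          exact hmin m h (by simp [pvSpecChar, hget, hcs])
        · exact h
        · exact absurd (by rw [List.getElem?_eq_getElem hj]) (hfirst j h)
      have hfind : PySem.Chars.find l [c] = (j : Int) := by omega
      have : is_in_comment_or_string_py line pos = true := by
        rw [pv_A_iff]
        rcases hcs with h | h | h
        · exact Or.inl ⟨by rw [← h, hfind]; omega, by rw [← h, hfind]; omega⟩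
        · exact Or.inr (Or.inl ⟨by rw [← h, hfind]; omega, by rw [← h, hfind]; omega⟩)
        · exact Or.inr (Or.inr ⟨by rw [← h, hfind]; omega, by rw [← h, hfind]; omega⟩)
      simp [this]
      omega
    · have : is_in_comment_or_string_py line pos ≠ true := by
        rw [ne_eq, pv_A_iff, ← hl]
        rintro (⟨h1, h2⟩ | ⟨h1, h2⟩ | ⟨h1, h2⟩)
        · have := hge '#' (by simp) h1; omega
        · have := hge '"' (by simp) h1; omega
        · have := hge '\'' (by simp) h1; omega
      simp only [Bool.not_eq_true] at this
      simp [this]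
      omega

-- ===== VERDICT (by name: the statement is the Claim_ definition above) =====
theorem is_in_comment_or_string_py_spec : Claim_equal_is_in_comment_or_string_py := by
  intro line pos _
  unfold Spec_is_in_comment_or_string_py
  exact pv_main line pos
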